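-- pv_equiv track=rewrite | github.com/grquigg/BFOProver | kowalski2.py | get_variable_count
-- ===== SOURCE A (Python) =====
-- def is_variable(element):
--     return len(element) == 1 and element.upper
--
-- def get_variable_count(clauses):
--     variable_count = 0
--     variables = []
--     for clause in clauses:
--         for term in clause:
--             if(is_variable(term) and term not in variables):
--                 variable_count += 1
--                 variables.append(term)
--     return variable_count
-- ===== SOURCE B (Python) =====
-- def get_variable_count(clauses):
--     # Sort-then-scan: gather the single-character terms, sort them so equal
--     # terms are adjacent, then count run boundaries (= distinct values).
--     terms = sorted(t for clause in clauses for t in clause if len(t) == 1)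
--     count = 0
--     prev = None
--     for t in terms:
--         if t != prev:
--             count += 1
--         prev = t
--     return count
-- ===== Notes on version B (the rewrite author's own statement) =====
-- stated objective: alternative
-- what changed: Replaces A's online seen-list-with-membership-scan dedup by a staged sort-then-scan: collect all single-character terms, sort them to group duplicates, and count run boundaries in one linear pass.
import Mathlib
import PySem

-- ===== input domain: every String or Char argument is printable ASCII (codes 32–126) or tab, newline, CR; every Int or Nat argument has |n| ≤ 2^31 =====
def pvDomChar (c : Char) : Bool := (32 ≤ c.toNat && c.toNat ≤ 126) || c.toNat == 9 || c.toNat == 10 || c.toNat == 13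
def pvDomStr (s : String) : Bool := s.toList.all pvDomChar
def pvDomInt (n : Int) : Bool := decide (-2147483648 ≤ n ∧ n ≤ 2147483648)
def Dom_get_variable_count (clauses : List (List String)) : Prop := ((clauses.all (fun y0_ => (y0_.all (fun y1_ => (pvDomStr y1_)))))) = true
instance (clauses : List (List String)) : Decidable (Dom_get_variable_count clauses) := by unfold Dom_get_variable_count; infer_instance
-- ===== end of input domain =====

-- B replaces A's online seen-list dedup by a staged sort-then-scan (collect single-char
-- terms, sort to group duplicates, count run boundaries); same values on every input.

-- ===== PORT A =====
-- 'len(element) == 1 and element.upper' — '.upper' is a bound method, always truthy, so the result is truthy iff len == 1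
def is_variable (element : String) : Bool := PySem.Str.len element == 1

def get_variable_count (clauses : List (List String)) : Int :=
  let st := clauses.foldl (fun st clause =>
    clause.foldl (fun st term =>
      if is_variable term && !(st.2.contains term)
      then (st.1 + 1, st.2 ++ [term])
      else st) st) ((0 : Int), ([] : List String))
  st.1

-- ===== PORT B =====
def get_variable_count_alt (clauses : List (List String)) : Int :=
  let terms := PySem.List.sorted
    (clauses.flatMap (fun clause => clause.filter (fun t => PySem.Str.len t == 1)))
    (fun x => x) false
  -- 'for t in terms: if t != prev: count += 1; prev = t'  (prev starts as None)
  (terms.foldl (fun st t =>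
      (if some t ≠ st.2 then st.1 + 1 else st.1, some t))
    ((0 : Int), (none : Option String))).1

-- ===== PRECONDITION & SPEC =====
def Spec_get_variable_count (clauses : List (List String)) (out : Int) : Prop := out = get_variable_count_alt clauses
instance (clauses : List (List String)) (out : Int) : Decidable (Spec_get_variable_count clauses out) := by unfold Spec_get_variable_count; infer_instance

-- ===== CLAIM =====
def Claim_equal_get_variable_count : Prop := ∀ (clauses : List (List String)), Dom_get_variable_count clauses → Spec_get_variable_count clauses (get_variable_count clauses)

-- ===== LEMMAS AND PROOFS =====

-- A's inner loop over one clause: the seen-list grows by Set.add over the clause's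
-- single-char terms, with the counter tracking the list's length.
theorem pv_inner (terms : List String) (vars : List String) :
    terms.foldl (fun st term =>
      if is_variable term && !(st.2.contains term)
      then (st.1 + 1, st.2 ++ [term])
      else st) (((vars.length : Int), vars)) =
    ((((terms.filter (fun t => PySem.Str.len t == 1)).foldl PySem.Set.add vars).length : Int),
      (terms.filter (fun t => PySem.Str.len t == 1)).foldl PySem.Set.add vars) := by
  induction terms generalizing vars with
  | nil => rfl
  | cons t ts ih =>
    simp only [List.foldl_cons, List.filter_cons]
    by_cases hv : t.length = 1
    · by_cases hm : t ∈ vars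
      · simpa [is_variable, hv, hm, PySem.Set.add] using ih vars
      · simpa [is_variable, hv, hm, PySem.Set.add] using ih (vars ++ [t])
    · simpa [is_variable, hv] using ih vars

-- A's outer loop flattens to Set.add folded over the concatenated single-char terms.
theorem pv_outer (clauses : List (List String)) (vars : List String) :
    (clauses.foldl (fun st clause =>
      clause.foldl (fun st term =>
        if is_variable term && !(st.2.contains term)
        then (st.1 + 1, st.2 ++ [term])
        else st) st) (((vars.length : Int), vars))).1 =
    (((clauses.flatMap (fun clause => clause.filter (fun t => PySem.Str.len t == 1))).foldl
        PySem.Set.add vars).length : Int) := by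
  induction clauses generalizing vars with
  | nil => rfl
  | cons c cs ih =>
    simp only [List.foldl_cons, List.flatMap_cons, List.foldl_append]
    rw [pv_inner c vars]
    exact ih ((c.filter (fun t => PySem.Str.len t == 1)).foldl PySem.Set.add vars)

-- A's value is the number of distinct single-char terms.
theorem pvA_card (l : List String) :
    ((PySem.Set.ofList l).length : Int) = (l.toFinset.card : Int) := by
  have hnd : (PySem.Set.ofList l).Nodup := PySem.Set.nodup_ofList l
  have hmem : ∀ x, x ∈ PySem.Set.ofList l ↔ x ∈ l := fun x => PySem.Set.mem_ofList l x
  have : (PySem.Set.ofList l).toFinset = l.toFinset := by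
    ext x; simp [hmem]
  rw [← List.toFinset_card_of_nodup hnd, this]

-- B's scan over a ≤-sorted list counts the distinct values (minus the previous one, if any).
theorem pv_scan (l : List String) (hl : l.Pairwise (· ≤ ·)) (c : Int) (p : Option String)
    (hp : ∀ q, p = some q → ∀ x ∈ l, q ≤ x) :
    (l.foldl (fun st t => (if some t ≠ st.2 then st.1 + 1 else st.1, some t)) (c, p)).1 =
    c + ((match p with
          | none => l.toFinset
          | some q => l.toFinset.erase q).card : Int) := by
  induction l generalizing c p with
  | nil => cases p <;> simp
  | cons x xs ih =>
    have hxs : ∀ q, (some x : Option String) = some q → ∀ y ∈ xs, q ≤ y := by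
      rintro q rfl' y hy
      cases rfl' ; exact (List.pairwise_cons.1 hl).1 y hy
    have hcard : (insert x xs.toFinset).card = (xs.toFinset.erase x).card + 1 := by
      by_cases hx : x ∈ xs.toFinset
      · rw [Finset.insert_eq_self.2 hx, Finset.card_erase_add_one hx]
      · rw [Finset.erase_eq_self.2 hx, Finset.card_insert_of_notMem hx]
    simp only [List.foldl_cons]
    cases p with
    | none =>
      rw [if_pos (by simp), ih hl.tail (c + 1) (some x) hxs]
      simp only [List.toFinset_cons]
      rw [hcard]
      push_cast; ring
    | some q =>
      by_cases hq : q = x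
      · subst hq
        rw [if_neg (by simp), ih hl.tail c (some q) hxs]
        simp only [List.toFinset_cons, Finset.erase_insert_eq_erase]
      · rw [if_pos (by simp only [ne_eq, Option.some.injEq]; exact fun h => hq h.symm), ih hl.tail (c + 1) (some x) hxs]
        have hqx : q < x := lt_of_le_of_ne (hp q rfl x (List.mem_cons_self)) hq
        have hnot : q ∉ insert x xs.toFinset := by
          simp only [Finset.mem_insert, List.mem_toFinset]
          rintro (rfl' | hmem)
          · exact absurd rfl' hq
          · exact absurd rfl (ne_of_lt (lt_of_lt_of_le hqx ((List.pairwise_cons.1 hl).1 q hmem)))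
        simp only [List.toFinset_cons, Finset.erase_eq_self.2 hnot]
        rw [hcard]
        push_cast; ring

-- ===== VERDICT =====
theorem get_variable_count_spec : Claim_equal_get_variable_count := by
  intro clauses _
  unfold Spec_get_variable_count get_variable_count get_variable_count_alt
  set flat := clauses.flatMap (fun clause => clause.filter (fun t => PySem.Str.len t == 1)) with hflat
  have hA := pv_outer clauses []
  simp only [List.length_nil, Nat.cast_zero] at hA
  have hB := pv_scan (PySem.List.sorted flat (fun x => x) false)
      (by simpa using PySem.List.sorted_pairwise flat (fun x => x)) 0 none (by simp)
  have hperm : (PySem.List.sorted flat (fun x => x) false).toFinset = flat.toFinset := by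
    ext y; simp [PySem.List.mem_sorted]
  simp only [hflat] at hA hB ⊢
  rw [hA, hB, hperm, ← PySem.Set.ofList_eq_foldl, pvA_card]
  ring
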